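-- pv_equiv track=rewrite | github.com/shadow-maker/GeneradorHorariosUTEC | func.py | getLimHorasHorarios
-- ===== SOURCE A (Python) =====
-- def getLimHoras(horario):
-- 	minList = []
-- 	maxList = []
-- 	for dia in horario:
-- 		for i in range(len(dia)):
-- 			if dia[i]:
-- 				minList.append(i)
-- 				break
--
-- 		for i in range(len(dia), 0, -1):
-- 			if dia[i - 1]:
-- 				maxList.append(i - 1)
-- 				break
--
-- 	return min(minList), max(maxList)
--
-- def getLimHorasHorarios(horarios):
-- 	minList = []
-- 	maxList = []
--
-- 	for horario in horarios:
-- 		min, max = getLimHoras(horario)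
-- 		minList.append(int(min))
-- 		maxList.append(int(max))
--
-- 	return minList, maxList
-- ===== SOURCE B (Python) =====
-- def _filled(horario):
--     # flat list of every filled column index over all days of this schedule
--     return [i for dia in horario for i, v in enumerate(dia) if v]
--
-- def getLimHorasHorarios(horarios):
--     minList = [int(min(_filled(horario))) for horario in horarios]
--     maxList = [int(max(_filled(horario))) for horario in horarios]
--     return minList, maxList
-- ===== Notes on version B (the rewrite author's own statement) =====
-- stated objective: simpler
-- what changed: Replaces A's per-day forward early-break scan and separate backward early-break scan plus min/max over the per-day lists by one flat comprehension of all filled indices per schedule, taking min and max of that single list.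
import Mathlib
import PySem

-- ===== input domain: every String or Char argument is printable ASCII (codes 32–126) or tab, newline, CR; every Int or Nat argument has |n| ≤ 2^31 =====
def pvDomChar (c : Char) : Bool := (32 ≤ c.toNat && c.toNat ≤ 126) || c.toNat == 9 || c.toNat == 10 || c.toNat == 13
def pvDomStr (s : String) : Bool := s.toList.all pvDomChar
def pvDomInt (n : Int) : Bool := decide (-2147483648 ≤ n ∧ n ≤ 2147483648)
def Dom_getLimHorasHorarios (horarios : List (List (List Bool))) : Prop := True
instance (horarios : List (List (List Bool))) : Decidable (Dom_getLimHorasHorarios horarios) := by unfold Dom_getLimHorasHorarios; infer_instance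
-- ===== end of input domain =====

-- B replaces A's separate forward/backward early-break scans per day by one flat list of
-- filled indices per schedule, taking min and max of that list (objective: simpler).

-- ===== PORT A =====
-- forward loop: 'for i in range(len(dia)): if dia[i]: minList.append(i); break'
def pvFwd (dia : List Bool) (i : Int) : Option Int :=
  match dia with
  | [] => none
  | b :: t => if b then some i else pvFwd t (i + 1)

-- backward loop body: 'for i in range(len(dia), 0, -1): if dia[i-1]: maxList.append(i-1); break'
def pvBwd (dia : List Bool) : List Int → Option Int
  | [] => none
  | i :: rest => if PySem.List.pyGetD dia (i - 1) false then some (i - 1) else pvBwd dia rest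

-- getLimHoras's two accumulator lists
def pvLimLoop (horario : List (List Bool)) (mn mx : List Int) : List Int × List Int :=
  match horario with
  | [] => (mn, mx)
  | dia :: rest =>
      let mn' := match pvFwd dia 0 with | some i => mn ++ [i] | none => mn
      let mx' := match pvBwd dia (PySem.List.pyRange (PySem.List.len dia) 0 (-1)) with
                 | some i => mx ++ [i] | none => mx
      pvLimLoop rest mn' mx'

-- min()/max() raise on an empty list; Pre_ guarantees nonempty, the default 0 is never used there
def pvGetLimHoras (horario : List (List Bool)) : Int × Int :=
  let (mn, mx) := pvLimLoop horario [] []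
  ((PySem.List.min? mn (fun x => x)).getD 0, (PySem.List.max? mx (fun x => x)).getD 0)

def pvMainLoop (horarios : List (List (List Bool))) (mn mx : List Int) : List Int × List Int :=
  match horarios with
  | [] => (mn, mx)
  | h :: rest =>
      let p := pvGetLimHoras h
      pvMainLoop rest (mn ++ [p.1]) (mx ++ [p.2])

def getLimHorasHorarios (horarios : List (List (List Bool))) : List Int × List Int :=
  pvMainLoop horarios [] []

-- ===== PORT B =====
-- '[i for dia in horario for i, v in enumerate(dia) if v]'
def pvFilled (horario : List (List Bool)) : List Int :=
  horario.flatMap (fun dia =>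
    (PySem.List.enumerate dia 0).filterMap (fun p => if p.2 then some p.1 else none))

def getLimHorasHorarios_alt (horarios : List (List (List Bool))) : List Int × List Int :=
  (horarios.map (fun h => ((PySem.List.min? (pvFilled h) (fun x => x)).getD 0)),
   horarios.map (fun h => ((PySem.List.max? (pvFilled h) (fun x => x)).getD 0)))

-- ===== PRECONDITION & SPEC =====
-- Pre_ excludes exactly the inputs where Python's min()/max() of an empty list raises ValueError:
-- a schedule with no filled slot at all (both A and B raise there).
def Pre_getLimHorasHorarios (horarios : List (List (List Bool))) : Prop :=
  ∀ h ∈ horarios, ∃ d ∈ h, true ∈ d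
instance (horarios : List (List (List Bool))) : Decidable (Pre_getLimHorasHorarios horarios) := by
  unfold Pre_getLimHorasHorarios; infer_instance

def pvWitness_getLimHorasHorarios : List (List (List Bool)) :=
  [[[false, true, false], [true]], [[false], [false, false, true]]]

def Spec_getLimHorasHorarios (horarios : List (List (List Bool))) (out : List Int × List Int) : Prop := out = getLimHorasHorarios_alt horarios
instance (horarios : List (List (List Bool))) (out : List Int × List Int) : Decidable (Spec_getLimHorasHorarios horarios out) := by unfold Spec_getLimHorasHorarios; infer_instance

-- ===== CLAIM (what is proved, stated in full; the proofs are below) =====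
def Claim_equal_getLimHorasHorarios : Prop := ∀ (horarios : List (List (List Bool))), Dom_getLimHorasHorarios horarios → Pre_getLimHorasHorarios horarios → Spec_getLimHorasHorarios horarios (getLimHorasHorarios horarios)

-- ===== LEMMAS AND PROOFS =====

-- day-level filled-index list
def pvFd (dia : List Bool) (s : Int) : List Int :=
  (PySem.List.enumerate dia s).filterMap (fun p => if p.2 then some p.1 else none)

theorem pvFd_nil (s : Int) : pvFd [] s = [] := rfl

theorem pvFd_cons (b : Bool) (t : List Bool) (s : Int) :
    pvFd (b :: t) s = (if b then [s] else []) ++ pvFd t (s + 1) := by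
  cases b <;> simp [pvFd, PySem.List.enumerate_cons]

theorem pvFd_mem_le (dia : List Bool) (s : Int) : ∀ x ∈ pvFd dia s, s ≤ x := by
  induction dia generalizing s with
  | nil => simp [pvFd_nil]
  | cons b t ih =>
      intro x hx
      rw [pvFd_cons] at hx
      rcases List.mem_append.mp hx with h | h
      · cases b <;> simp_all
      · have := ih (s + 1) x h; omega

theorem pv_foldl_min_of_le (l : List Int) (x : Int) (h : ∀ y ∈ l, x ≤ y) :
    l.foldl min x = x := by
  induction l generalizing x with
  | nil => rfl
  | cons a t ih =>
      simp only [List.foldl_cons]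
      have hx : min x a = x := min_eq_left (h a (by simp))
      rw [hx]; exact ih x (fun y hy => h y (by simp [hy]))

theorem pv_foldl_max_le (l : List Int) (x m : Int) (hx : x ≤ m) (h : ∀ y ∈ l, y ≤ m) :
    l.foldl max x ≤ m := by
  induction l generalizing x with
  | nil => exact hx
  | cons a t ih =>
      simp only [List.foldl_cons]
      exact ih (max x a) (max_le hx (h a (by simp))) (fun y hy => h y (by simp [hy]))

-- the forward early-break loop finds min of the day's filled indices
theorem pvFwd_eq_min (dia : List Bool) (s : Int) :
    pvFwd dia s = PySem.List.min? (pvFd dia s) (fun x => x) := by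
  induction dia generalizing s with
  | nil => rfl
  | cons b t ih =>
      cases b with
      | true =>
          have hmin : (pvFd t (s + 1)).foldl min s = s :=
            pv_foldl_min_of_le _ s (fun y hy => le_trans (by omega) (pvFd_mem_le t (s+1) y hy))
          simp [pvFwd, pvFd_cons, PySem.List.min?_id_cons, hmin]
      | false =>
          simp [pvFwd, pvFd_cons, ih (s + 1)]

theorem pvFd_mem_lt (dia : List Bool) (s : Int) :
    ∀ x ∈ pvFd dia s, x < s + dia.length := by
  induction dia generalizing s with
  | nil => simp [pvFd_nil]
  | cons b t ih =>
      intro x hx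
      rw [pvFd_cons] at hx
      rcases List.mem_append.mp hx with h | h
      · cases b <;> simp_all
      · have := ih (s + 1) x h; simp only [List.length_cons]; push_cast; omega

theorem pvFd_append (xs ys : List Bool) (s : Int) :
    pvFd (xs ++ ys) s = pvFd xs s ++ pvFd ys (s + xs.length) := by
  simp [pvFd, PySem.List.enumerate_append, List.filterMap_append]

theorem pv_max_append_last (l : List Int) (m : Int) (h : ∀ y ∈ l, y ≤ m) :
    PySem.List.max? (l ++ [m]) (fun x => x) = some m := by
  cases l with
  | nil => simp [PySem.List.max?_id_cons]
  | cons a t =>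
      rw [List.cons_append, PySem.List.max?_id_cons, List.foldl_append]
      simp only [List.foldl_cons, List.foldl_nil, Option.some_inj]
      exact max_eq_right (pv_foldl_max_le t a m (h a (by simp)) (fun y hy => h y (by simp [hy])))

theorem pv_min_nil : PySem.List.min? ([] : List Int) (fun x => x) = none := rfl
theorem pv_max_nil : PySem.List.max? ([] : List Int) (fun x => x) = none := rfl

-- the backward early-break loop finds max of the filled indices of the first n slots
theorem pvBwd_take (dia : List Bool) (n : Nat) (hn : n ≤ dia.length) :
    pvBwd dia (PySem.List.pyRange (n : Int) 0 (-1)) =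
      PySem.List.max? (pvFd (dia.take n) 0) (fun x => x) := by
  induction n with
  | zero => simp [PySem.List.pyRange_neg_one_eq_nil, pvBwd, pvFd_nil, pv_max_nil]
  | succ n ih =>
      have hlt : n < dia.length := by omega
      rw [PySem.List.pyRange_neg_one_cons (by push_cast; omega)]
      have hsub : ((n + 1 : Nat) : Int) - 1 = (n : Int) := by push_cast; omega
      have htake : dia.take (n + 1) = dia.take n ++ [dia[n]] := by
        rw [List.take_add_one, List.getElem?_eq_getElem hlt]; rfl
      have hlen : (dia.take n).length = n := by simp [hlt.le]
      simp only [pvBwd, hsub, PySem.List.pyGetD_natCast, List.getD_eq_getElem?_getD,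
        List.getElem?_eq_getElem hlt, Option.getD_some]
      cases hb : dia[n] with
      | true =>
          rw [if_pos rfl, htake, pvFd_append, hlen, hb]
          rw [show pvFd [true] ((0:Int) + n) = [(n:Int)] by simp [pvFd_cons, pvFd_nil]]
          exact (pv_max_append_last _ _ (fun y hy => by
            have := pvFd_mem_lt (dia.take n) 0 y hy
            rw [hlen] at this; omega)).symm
      | false =>
          rw [if_neg (by simp), ih (by omega), htake, pvFd_append, hlen, hb]
          rw [show pvFd [false] ((0:Int) + n) = [] by simp [pvFd_cons, pvFd_nil]]
          simp

theorem pvBwd_eq_max (dia : List Bool) :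
    pvBwd dia (PySem.List.pyRange (PySem.List.len dia) 0 (-1)) =
      PySem.List.max? (pvFd dia 0) (fun x => x) := by
  have := pvBwd_take dia dia.length le_rfl
  rw [List.take_length] at this
  simpa [PySem.List.len_eq] using this

-- Option-valued min/max, how min?/max? compose across ++
def pvOMin (a b : Option Int) : Option Int :=
  match a, b with
  | none, b => b
  | some x, none => some x
  | some x, some y => some (min x y)

def pvOMax (a b : Option Int) : Option Int :=
  match a, b with
  | none, b => b
  | some x, none => some x
  | some x, some y => some (max x y)

theorem pv_foldl_min_min (l : List Int) (a b : Int) :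
    l.foldl min (min a b) = min a (l.foldl min b) := by
  induction l generalizing b with
  | nil => rfl
  | cons c t ih => simp only [List.foldl_cons, min_assoc, ih]

theorem pv_foldl_max_max (l : List Int) (a b : Int) :
    l.foldl max (max a b) = max a (l.foldl max b) := by
  induction l generalizing b with
  | nil => rfl
  | cons c t ih => simp only [List.foldl_cons, max_assoc, ih]

theorem pv_min_append (xs ys : List Int) :
    PySem.List.min? (xs ++ ys) (fun x => x) =
      pvOMin (PySem.List.min? xs (fun x => x)) (PySem.List.min? ys (fun x => x)) := by
  cases xs with
  | nil => cases ys <;> simp [pvOMin, PySem.List.min?_id_cons, pv_min_nil]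
  | cons x t =>
      cases ys with
      | nil => simp [pvOMin, PySem.List.min?_id_cons, pv_min_nil]
      | cons y u =>
          rw [List.cons_append, PySem.List.min?_id_cons, List.foldl_append]
          simp [pvOMin, PySem.List.min?_id_cons, List.foldl_cons, pv_foldl_min_min]

theorem pv_max_append (xs ys : List Int) :
    PySem.List.max? (xs ++ ys) (fun x => x) =
      pvOMax (PySem.List.max? xs (fun x => x)) (PySem.List.max? ys (fun x => x)) := by
  cases xs with
  | nil => cases ys <;> simp [pvOMax, PySem.List.max?_id_cons, pv_max_nil]
  | cons x t =>
      cases ys with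
      | nil => simp [pvOMax, PySem.List.max?_id_cons, pv_max_nil]
      | cons y u =>
          rw [List.cons_append, PySem.List.max?_id_cons, List.foldl_append]
          simp [pvOMax, PySem.List.max?_id_cons, List.foldl_cons, pv_foldl_max_max]

theorem pv_min_filterMap_flatMap {α : Type} (l : List α) (g : α → List Int) :
    PySem.List.min? (l.filterMap (fun d => PySem.List.min? (g d) (fun x => x))) (fun x => x) =
      PySem.List.min? (l.flatMap g) (fun x => x) := by
  induction l with
  | nil => rfl
  | cons d rest ih =>
      rw [List.flatMap_cons, pv_min_append, ih.symm]
      cases h : PySem.List.min? (g d) (fun x => x) with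
      | none => simp [h, pvOMin]
      | some v =>
          simp only [List.filterMap_cons, h]
          generalize (List.filterMap (fun d => PySem.List.min? (g d) fun x => x) rest) = L
          cases L with
          | nil => simp [PySem.List.min?_id_cons, pvOMin, pv_min_nil]
          | cons y u => simp [PySem.List.min?_id_cons, pvOMin, pv_foldl_min_min]

theorem pv_max_filterMap_flatMap {α : Type} (l : List α) (g : α → List Int) :
    PySem.List.max? (l.filterMap (fun d => PySem.List.max? (g d) (fun x => x))) (fun x => x) =
      PySem.List.max? (l.flatMap g) (fun x => x) := by
  induction l with
  | nil => rfl
  | cons d rest ih =>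
      rw [List.flatMap_cons, pv_max_append, ih.symm]
      cases h : PySem.List.max? (g d) (fun x => x) with
      | none => simp [h, pvOMax]
      | some v =>
          simp only [List.filterMap_cons, h]
          generalize (List.filterMap (fun d => PySem.List.max? (g d) fun x => x) rest) = L
          cases L with
          | nil => simp [PySem.List.max?_id_cons, pvOMax, pv_max_nil]
          | cons y u => simp [PySem.List.max?_id_cons, pvOMax, pv_foldl_max_max]

-- A's inner loop builds exactly the per-day filterMap lists
theorem pvLimLoop_eq (horario : List (List Bool)) (mn mx : List Int) :
    pvLimLoop horario mn mx =
      (mn ++ horario.filterMap (fun d => pvFwd d 0),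
       mx ++ horario.filterMap (fun d =>
         pvBwd d (PySem.List.pyRange (PySem.List.len d) 0 (-1)))) := by
  induction horario generalizing mn mx with
  | nil => simp [pvLimLoop]
  | cons dia rest ih =>
      simp only [pvLimLoop, List.filterMap_cons]
      cases h1 : pvFwd dia 0 <;> cases h2 : pvBwd dia (PySem.List.pyRange (PySem.List.len dia) 0 (-1)) <;>
        simp [ih]

theorem pvGetLimHoras_eq (h : List (List Bool)) :
    pvGetLimHoras h =
      ((PySem.List.min? (pvFilled h) (fun x => x)).getD 0,
       (PySem.List.max? (pvFilled h) (fun x => x)).getD 0) := by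
  unfold pvGetLimHoras
  rw [pvLimLoop_eq]
  simp only [List.nil_append]
  have h1 : h.filterMap (fun d => pvFwd d 0)
      = h.filterMap (fun d => PySem.List.min? (pvFd d 0) (fun x => x)) := by
    apply List.filterMap_congr; intro d _; exact pvFwd_eq_min d 0
  have h2 : h.filterMap (fun d => pvBwd d (PySem.List.pyRange (PySem.List.len d) 0 (-1)))
      = h.filterMap (fun d => PySem.List.max? (pvFd d 0) (fun x => x)) := by
    apply List.filterMap_congr; intro d _; exact pvBwd_eq_max d
  rw [h1, h2, pv_min_filterMap_flatMap, pv_max_filterMap_flatMap]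
  rfl

theorem pvMainLoop_eq (horarios : List (List (List Bool))) (mn mx : List Int) :
    pvMainLoop horarios mn mx =
      (mn ++ horarios.map (fun h => (pvGetLimHoras h).1),
       mx ++ horarios.map (fun h => (pvGetLimHoras h).2)) := by
  induction horarios generalizing mn mx with
  | nil => simp [pvMainLoop]
  | cons h rest ih => simp [pvMainLoop, ih]

-- ===== VERDICT (by name: the statement is the Claim_ definition above) =====
theorem getLimHorasHorarios_spec : Claim_equal_getLimHorasHorarios := by
  intro horarios _ _
  unfold Spec_getLimHorasHorarios getLimHorasHorarios getLimHorasHorarios_alt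
  rw [pvMainLoop_eq]
  simp only [List.nil_append]
  simp only [Prod.mk.injEq]
  constructor <;> (apply List.map_congr_left; intro h _; rw [pvGetLimHoras_eq])
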